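-- pv_equiv track=rewrite | github.com/buckethoop/class-projects | python_assignments/project1lab1.py | replace_punctuation
-- ===== SOURCE A (Python) =====
-- def replace_punctuation(string, **kwargs):
--     new_string=''
--     exclamation_count = 0
--     semicolon_count = 0
--     for character in string:
--         if character == '!':
--             new_string += '.'
--             exclamation_count += 1
--         elif character == ';':
--             new_string += ','
--             semicolon_count += 1
--         else:
--             new_string += character
--     return exclamation_count,semicolon_count,new_string
-- ===== SOURCE B (Python) =====
-- def replace_punctuation(string, **kwargs):
--     return (string.count('!'),
--             string.count(';'),
--             string.translate(str.maketrans({'!': '.', ';': ','})))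
-- ===== Notes on version B (the rewrite author's own statement) =====
-- stated objective: idiomatic
-- what changed: Replaces the fused character loop (building the string and both counters together) with three independent library passes: str.count for each counter and str.translate for the replacement; the C-level library loops beat the Python-level per-character loop with string concatenation by a large constant factor.
import Mathlib
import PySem

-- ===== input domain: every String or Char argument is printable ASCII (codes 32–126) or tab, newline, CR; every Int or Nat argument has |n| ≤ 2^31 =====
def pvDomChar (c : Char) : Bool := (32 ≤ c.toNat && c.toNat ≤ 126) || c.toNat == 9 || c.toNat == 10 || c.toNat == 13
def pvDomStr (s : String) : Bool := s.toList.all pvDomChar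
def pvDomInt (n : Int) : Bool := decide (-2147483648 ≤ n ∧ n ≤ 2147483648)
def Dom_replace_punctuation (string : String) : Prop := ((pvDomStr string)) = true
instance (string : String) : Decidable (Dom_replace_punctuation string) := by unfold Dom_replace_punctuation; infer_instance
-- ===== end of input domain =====

-- B replaces A's fused character loop with three independent library passes (two counts + a translate map); objective: idiomatic.


-- ===== PORT A =====
-- single pass building the new string and both counters together
def replace_punctuation (string : String) : Int × Int × String :=
  let r := string.toList.foldl
    (fun (st : List Char × Int × Int) c =>
      if c == '!' then (st.1 ++ ['.'], st.2.1 + 1, st.2.2)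
      else if c == ';' then (st.1 ++ [','], st.2.1, st.2.2 + 1)
      else (st.1 ++ [c], st.2.1, st.2.2))
    ([], 0, 0)
  (r.2.1, r.2.2, String.ofList r.1)

-- ===== PORT B =====
-- str.maketrans({'!':'.', ';':','}) applied pointwise
def pvTranslate1 (c : Char) : Char :=
  if c == '!' then '.' else if c == ';' then ',' else c

def replace_punctuation_alt (string : String) : Int × Int × String :=
  ((PySem.Str.count string "!" : Int),
   (PySem.Str.count string ";" : Int),
   String.ofList (string.toList.map pvTranslate1))

-- ===== PRECONDITION & SPEC =====
def Spec_replace_punctuation (string : String) (out : Int × Int × String) : Prop := out = replace_punctuation_alt string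
instance (string : String) (out : Int × Int × String) : Decidable (Spec_replace_punctuation string out) := by unfold Spec_replace_punctuation; infer_instance

-- ===== CLAIM (what is proved, stated in full; the proofs are below) =====
def Claim_equal_replace_punctuation : Prop := ∀ (string : String), Dom_replace_punctuation string → Spec_replace_punctuation string (replace_punctuation string)

-- ===== LEMMAS AND PROOFS =====

-- Python's s.count(c) for a single character equals List.count
lemma count_go_single (c : Char) (l : List Char) (fuel acc : Nat) (h : l.length ≤ fuel) :
    PySem.Chars.count.go [c] fuel l acc = acc + l.count c := by
  induction l generalizing fuel acc with
  | nil => cases fuel <;> simp [PySem.Chars.count.go]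
  | cons x t ih =>
    cases fuel with
    | zero => simp at h
    | succ f =>
      have hf : t.length ≤ f := by simpa using h
      simp only [PySem.Chars.count.go, List.isPrefixOf_cons₂, List.isPrefixOf_nil_left,
        Bool.and_true, List.length_cons, List.drop_succ_cons]
      by_cases hx : c = x
      · subst hx
        simp [ih f (acc + 1) hf]
        omega
      · have hb : (c == x) = false := by simp [hx]
        simp [hb, ih f acc hf, Ne.symm hx]

lemma chars_count_single (c : Char) (l : List Char) :
    PySem.Chars.count l [c] = l.count c := by
  simp [PySem.Chars.count, count_go_single c l l.length 0 le_rfl]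

-- the fused loop of A computed in closed form
lemma foldA_eq (l : List Char) (acc : List Char) (e s : Int) :
    l.foldl
      (fun (st : List Char × Int × Int) c =>
        if c == '!' then (st.1 ++ ['.'], st.2.1 + 1, st.2.2)
        else if c == ';' then (st.1 ++ [','], st.2.1, st.2.2 + 1)
        else (st.1 ++ [c], st.2.1, st.2.2))
      (acc, e, s)
    = (acc ++ l.map pvTranslate1, e + l.count '!', s + l.count ';') := by
  induction l generalizing acc e s with
  | nil => simp
  | cons x t ih =>
    simp only [List.foldl_cons]
    by_cases h1 : x = '!'
    · subst h1
      rw [if_pos (by simp), ih]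
      simp [pvTranslate1]
      omega
    · by_cases h2 : x = ';'
      · subst h2
        rw [if_neg (by simp), if_pos (by simp), ih]
        simp [pvTranslate1]
        omega
      · rw [if_neg (by simp [h1]), if_neg (by simp [h2]), ih]
        simp [pvTranslate1, h1, h2]

-- ===== VERDICT (by name: the statement is the Claim_ definition above) =====
theorem replace_punctuation_spec : Claim_equal_replace_punctuation := by
  intro str _
  show _ = _
  simp only [replace_punctuation, replace_punctuation_alt, foldA_eq, PySem.Str.count]
  simp [chars_count_single]
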